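-- pv_equiv track=rewrite | github.com/captainmoha/MITx-6.00.1x | Week 4/Pset/ProblemSet4/ps4b.py | isValidWordComp
-- ===== SOURCE A (Python) =====
-- def isValidWordComp(word, hand):
--     """
--     Returns True if word is in the wordList and is entirely
--     composed of letters in the hand. Otherwise, returns False.
--
--     Does not mutate hand or wordList.
--
--     word: string
--     hand: dictionary (string -> int)
--     wordList: list of lowercase strings
--     """
--     wordLettersInHand = ''                     # empty string to fill with letter in hand
--     copyHand = dict(hand)                      # copy of hand to iterate on
--
--     for letter in word:
--         if (letter in copyHand) and (copyHand[letter] != 0):  # conditions for a letter to be valid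
--             wordLettersInHand += str(letter)     # if the letter is valid add it to the new string
--             copyHand[letter] -= 1                # subtract 1 from number of available similar letters
--
--     if word == wordLettersInHand:                # if the letters in the match make up the word
--         satisfiesHand = True
--     else:
--         satisfiesHand = False
--
--     return satisfiesHand
-- ===== SOURCE B (Python) =====
-- def isValidWordComp(word, hand):
--     needed = {}
--     for letter in word:
--         needed[letter] = needed.get(letter, 0) + 1
--     return all(hand.get(ch, 0) >= n for ch, n in needed.items())
-- ===== Notes on version B (the rewrite author's own statement) =====
-- stated objective: simpler
-- what changed: B builds a letter-count dictionary of the word in one pass and checks availability with a single all() over the distinct needed letters, instead of A's greedy per-letter consumption of a hand copy plus string reconstruction and equality comparison.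
-- intended difference: On words that are fully composable under A's rule while some needed letter has a negative count in hand, A returns True (its '!= 0' test treats a negative count as inexhaustible supply), whereas B returns False, the intended value since a negative count provides no letters. — e.g. on isValidWordComp("a", [("a", -1)]): A returns true, B returns false
import Mathlib
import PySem

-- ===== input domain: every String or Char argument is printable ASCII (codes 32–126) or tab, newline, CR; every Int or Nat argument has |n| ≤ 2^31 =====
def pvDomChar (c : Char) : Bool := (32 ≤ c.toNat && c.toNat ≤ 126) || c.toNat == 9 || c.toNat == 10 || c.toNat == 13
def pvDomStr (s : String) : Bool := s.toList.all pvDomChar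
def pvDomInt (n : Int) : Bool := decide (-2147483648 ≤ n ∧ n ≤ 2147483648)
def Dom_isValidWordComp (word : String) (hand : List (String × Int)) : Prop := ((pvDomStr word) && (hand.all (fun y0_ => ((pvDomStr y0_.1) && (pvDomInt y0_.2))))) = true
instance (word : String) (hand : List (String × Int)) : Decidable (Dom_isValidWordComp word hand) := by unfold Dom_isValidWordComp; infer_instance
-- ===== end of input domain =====

-- B counts the word's needed letters once and checks availability against hand,
-- replacing A's greedy consumption of a hand copy + string rebuild/compare (simpler, same cost).

-- ===== PORT A =====
def isValidWordComp (word : String) (hand : List (String × Int)) : Bool :=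
  -- wordLettersInHand is built as a List Char (exact for the ASCII domain); copyHand = dict(hand)
  let copyHand := PySem.Dict.ofList hand
  let st := word.toList.foldl
    (fun (st : List Char × PySem.Dict String Int) letter =>
      match st.2.get? (String.singleton letter) with
      | some c => if c ≠ 0 then (st.1 ++ [letter], st.2.insert (String.singleton letter) (c - 1)) else st
      | none => st)
    ([], copyHand)
  word.toList == st.1

-- ===== PORT B =====
def isValidWordComp_alt (word : String) (hand : List (String × Int)) : Bool :=
  let needed := word.toList.foldl
    (fun (d : PySem.Dict String Int) letter =>
      d.insert (String.singleton letter) (d.getD (String.singleton letter) 0 + 1))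
    PySem.Dict.empty
  needed.items.all (fun p => (PySem.Dict.ofList hand).getD p.1 0 ≥ p.2)

-- ===== PRECONDITION & SPEC =====
-- On words fully composable under A's rule while some needed letter has a negative hand count,
-- A returns True (its '!= 0' test treats a negative count as inexhaustible), B returns False — the intended value.
def D_isValidWordComp (word : String) (hand : List (String × Int)) : Prop :=
  (word.toList.all (fun c =>
      (PySem.Dict.ofList hand).contains (String.singleton c) &&
      (decide ((PySem.Dict.ofList hand).getD (String.singleton c) 0 < 0) ||
        decide ((word.toList.count c : Int) ≤ (PySem.Dict.ofList hand).getD (String.singleton c) 0)))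
    && word.toList.any (fun c =>
      decide ((PySem.Dict.ofList hand).getD (String.singleton c) 0 < 0))) = true
instance (word : String) (hand : List (String × Int)) : Decidable (D_isValidWordComp word hand) := by
  unfold D_isValidWordComp; infer_instance

def Spec_isValidWordComp (word : String) (hand : List (String × Int)) (out : Bool) : Prop :=
  ¬ D_isValidWordComp word hand → out = isValidWordComp_alt word hand
instance (word : String) (hand : List (String × Int)) (out : Bool) : Decidable (Spec_isValidWordComp word hand out) := by
  unfold Spec_isValidWordComp; infer_instance

def pvDiffWitness_isValidWordComp : String × (List (String × Int)) := ("a", [("a", -1)])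
def pvDiffWitnessOut_isValidWordComp : Bool × Bool := (true, false)

-- ===== CLAIM (what is proved, stated in full; the proofs are below) =====
def Claim_unchanged_isValidWordComp : Prop := ∀ (word : String) (hand : List (String × Int)), Dom_isValidWordComp word hand → Spec_isValidWordComp word hand (isValidWordComp word hand)
def Claim_changed_isValidWordComp : Prop := Dom_isValidWordComp (pvDiffWitness_isValidWordComp.1) (pvDiffWitness_isValidWordComp.2) ∧ D_isValidWordComp (pvDiffWitness_isValidWordComp.1) (pvDiffWitness_isValidWordComp.2) ∧ isValidWordComp (pvDiffWitness_isValidWordComp.1) (pvDiffWitness_isValidWordComp.2) = pvDiffWitnessOut_isValidWordComp.1 ∧ isValidWordComp_alt (pvDiffWitness_isValidWordComp.1) (pvDiffWitness_isValidWordComp.2) = pvDiffWitnessOut_isValidWordComp.2 ∧ pvDiffWitnessOut_isValidWordComp.1 ≠ pvDiffWitnessOut_isValidWordComp.2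
def Claim_exact_isValidWordComp : Prop := ∀ (word : String) (hand : List (String × Int)), Dom_isValidWordComp word hand → D_isValidWordComp word hand → isValidWordComp word hand ≠ isValidWordComp_alt word hand

-- ===== LEMMAS AND PROOFS =====

-- the output list A's greedy loop appends, as a structural recursion on the word's letters
def pvOut (d : PySem.Dict String Int) : List Char → List Char
  | [] => []
  | c :: cs =>
    match d.get? (String.singleton c) with
    | some v => if v ≠ 0 then c :: pvOut (d.insert (String.singleton c) (v - 1)) cs else pvOut d cs
    | none => pvOut d cs

theorem pvSingleton_inj {a b : Char} (h : String.singleton a = String.singleton b) : a = b := by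
  have := congrArg String.toList h
  simpa [String.singleton] using this

theorem pvFoldl_eq (cs : List Char) (acc : List Char) (d : PySem.Dict String Int) :
    (cs.foldl
      (fun (st : List Char × PySem.Dict String Int) letter =>
        match st.2.get? (String.singleton letter) with
        | some c => if c ≠ 0 then (st.1 ++ [letter], st.2.insert (String.singleton letter) (c - 1)) else st
        | none => st)
      (acc, d)).1 = acc ++ pvOut d cs := by
  induction cs generalizing acc d with
  | nil => simp [pvOut]
  | cons c cs ih =>
    simp only [List.foldl_cons]
    cases h : d.get? (String.singleton c) with
    | none =>
      simp only [pvOut, h]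
      exact ih acc d
    | some v =>
      by_cases hv : v = 0
      · simp only [pvOut, h, hv, ne_eq, not_true_eq_false, if_false]
        exact ih acc d
      · simp only [pvOut, h, if_pos hv]
        rw [ih]
        simp

theorem pvOut_length (d : PySem.Dict String Int) (cs : List Char) :
    (pvOut d cs).length ≤ cs.length := by
  induction cs generalizing d with
  | nil => simp [pvOut]
  | cons c cs ih =>
    simp only [pvOut]
    cases h : d.get? (String.singleton c) with
    | none => exact le_trans (ih d) (by simp)
    | some v =>
      by_cases hv : v = 0
      · simp only [hv, ne_eq, not_true_eq_false, if_false]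
        exact le_trans (ih d) (by simp)
      · simp only [if_pos hv, List.length_cons]
        exact Nat.succ_le_succ (ih _)

theorem pvOut_eq_iff (cs : List Char) (d : PySem.Dict String Int) :
    pvOut d cs = cs ↔
      ∀ c ∈ cs, ∃ v, d.get? (String.singleton c) = some v ∧ (v < 0 ∨ (cs.count c : Int) ≤ v) := by
  induction cs generalizing d with
  | nil => simp [pvOut]
  | cons c cs ih =>
    cases h : d.get? (String.singleton c) with
    | none =>
      simp only [pvOut, h]
      constructor
      · intro heq
        exfalso
        have hl := pvOut_length d cs
        rw [heq] at hl
        simp at hl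
      · intro hall
        exfalso
        obtain ⟨v, hv, _⟩ := hall c (by simp)
        rw [h] at hv; cases hv
    | some v =>
      by_cases hv : v = 0
      · subst hv
        simp only [pvOut, h, ne_eq, not_true_eq_false, if_false]
        constructor
        · intro heq
          exfalso
          have hl := pvOut_length d cs
          rw [heq] at hl
          simp at hl
        · intro hall
          exfalso
          obtain ⟨v', hv', hc⟩ := hall c (by simp)
          rw [h] at hv'
          obtain rfl : (0 : Int) = v' := by injection hv'
          rcases hc with h1 | h1
          · omega
          · rw [List.count_cons_self] at h1
            push_cast at h1
            omega
      · simp only [pvOut, h, if_pos hv, List.cons.injEq, true_and]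
        rw [ih]
        constructor
        · intro hall c' hc'
          rw [List.mem_cons] at hc'
          rcases hc' with rfl | hmem
          · refine ⟨v, h, ?_⟩
            by_cases hmem2 : c' ∈ cs
            · obtain ⟨v', hv', hcnd⟩ := hall c' hmem2
              rw [PySem.Dict.get?_insert_self] at hv'
              obtain rfl : v - 1 = v' := by injection hv'
              rw [List.count_cons_self]
              push_cast
              omega
            · rw [List.count_cons_self, List.count_eq_zero.mpr hmem2]
              push_cast
              omega
          · by_cases hcc : c' = c
            · subst hcc
              obtain ⟨v', hv', hcnd⟩ := hall c' hmem
              rw [PySem.Dict.get?_insert_self] at hv'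
              obtain rfl : v - 1 = v' := by injection hv'
              refine ⟨v, h, ?_⟩
              rw [List.count_cons_self]
              push_cast
              omega
            · obtain ⟨v', hv', hcnd⟩ := hall c' hmem
              rw [PySem.Dict.get?_insert_of_ne _ _ (fun hk => hcc (pvSingleton_inj hk))] at hv'
              exact ⟨v', hv', by simpa [List.count_cons, Ne.symm hcc] using hcnd⟩
        · intro hall c' hmem
          by_cases hcc : c' = c
          · subst hcc
            obtain ⟨v', hv', hcnd⟩ := hall c' (by simp)
            rw [h] at hv'
            obtain rfl : v = v' := by injection hv'
            refine ⟨v - 1, PySem.Dict.get?_insert_self _ _ _, ?_⟩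
            rw [List.count_cons_self] at hcnd
            push_cast at hcnd
            omega
          · obtain ⟨v', hv', hcnd⟩ := hall c' (by simp [hmem])
            refine ⟨v', ?_, ?_⟩
            · rw [PySem.Dict.get?_insert_of_ne _ _ (fun hk => hcc (pvSingleton_inj hk))]
              exact hv'
            · simpa [List.count_cons, Ne.symm hcc] using hcnd

-- characterization of A
theorem pvA_iff (word : String) (hand : List (String × Int)) :
    isValidWordComp word hand = true ↔
      ∀ c ∈ word.toList, ∃ v, (PySem.Dict.ofList hand).get? (String.singleton c) = some v ∧
        (v < 0 ∨ (word.toList.count c : Int) ≤ v) := by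
  simp only [isValidWordComp]
  rw [pvFoldl_eq]
  simp only [List.nil_append, beq_iff_eq]
  rw [eq_comm, pvOut_eq_iff]

-- characterization of B
theorem pvB_iff (word : String) (hand : List (String × Int)) :
    isValidWordComp_alt word hand = true ↔
      ∀ c ∈ word.toList, (word.toList.count c : Int) ≤ (PySem.Dict.ofList hand).getD (String.singleton c) 0 := by
  simp only [isValidWordComp_alt]
  rw [show (word.toList.foldl
      (fun (d : PySem.Dict String Int) letter =>
        d.insert (String.singleton letter) (d.getD (String.singleton letter) 0 + 1))
      PySem.Dict.empty)
    = (word.toList.map String.singleton).foldl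
        (fun (d : PySem.Dict String Int) k => d.insert k (d.getD k 0 + 1)) PySem.Dict.empty
    from by rw [List.foldl_map]]
  rw [PySem.Dict.foldl_insert_getD_add_one_eq_counter]
  rw [PySem.Dict.items_counter]
  simp only [List.all_map, List.all_eq_true, Function.comp, ge_iff_le, decide_eq_true_eq]
  constructor
  · intro hall c hc
    have hm : String.singleton c ∈ PySem.Set.ofList (word.toList.map String.singleton) := by
      rw [PySem.Set.mem_ofList]
      exact List.mem_map_of_mem hc
    have := hall _ hm
    rwa [List.count_map_of_injective _ _ (fun a b => pvSingleton_inj) c] at this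
  · intro hall k hk
    rw [PySem.Set.mem_ofList] at hk
    obtain ⟨c, hc, rfl⟩ := List.mem_map.mp hk
    rw [List.count_map_of_injective _ _ (fun a b => pvSingleton_inj) c]
    exact hall c hc

theorem pvCount_pos {c : Char} {cs : List Char} (h : c ∈ cs) : (1 : Int) ≤ (cs.count c : Int) := by
  have := List.count_pos_iff.mpr h
  omega

theorem pvD_iff (word : String) (hand : List (String × Int)) :
    D_isValidWordComp word hand ↔
      (∀ c ∈ word.toList,
          (PySem.Dict.ofList hand).contains (String.singleton c) = true ∧
          ((PySem.Dict.ofList hand).getD (String.singleton c) 0 < 0 ∨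
            (word.toList.count c : Int) ≤ (PySem.Dict.ofList hand).getD (String.singleton c) 0)) ∧
      (∃ c ∈ word.toList, (PySem.Dict.ofList hand).getD (String.singleton c) 0 < 0) := by
  unfold D_isValidWordComp
  simp [List.all_eq_true, List.any_eq_true, Bool.and_eq_true, Bool.or_eq_true, decide_eq_true_eq]

-- ===== VERDICT (by name: the statement is the Claim_ definition above) =====
theorem isValidWordComp_spec : Claim_unchanged_isValidWordComp := by
  intro word hand _ hnd
  rw [pvD_iff] at hnd
  push_neg at hnd
  show isValidWordComp word hand = isValidWordComp_alt word hand
  cases hb : isValidWordComp_alt word hand with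
  | true =>
    rw [pvB_iff] at hb
    rw [pvA_iff]
    intro c hc
    have hle := hb c hc
    have h1 := pvCount_pos hc
    cases hget : (PySem.Dict.ofList hand).get? (String.singleton c) with
    | none =>
      have := PySem.Dict.getD_of_get?_eq_none _ 0 hget
      rw [this] at hle
      omega
    | some v =>
      have := PySem.Dict.getD_of_get?_eq_some _ 0 hget
      rw [this] at hle
      exact ⟨v, rfl, Or.inr hle⟩
  | false =>
    cases ha : isValidWordComp word hand with
    | false => rfl
    | true =>
      exfalso
      rw [pvA_iff] at ha
      have hb' : ¬ (isValidWordComp_alt word hand = true) := by simp [hb]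
      rw [pvB_iff] at hb'
      push_neg at hb'
      obtain ⟨c, hc, hlt⟩ := hb'
      obtain ⟨v, hv, hcnd⟩ := ha c hc
      have hgd := PySem.Dict.getD_of_get?_eq_some _ 0 hv
      have hfirst : ∀ c' ∈ word.toList,
          (PySem.Dict.ofList hand).contains (String.singleton c') = true ∧
          ((PySem.Dict.ofList hand).getD (String.singleton c') 0 < 0 ∨
            (word.toList.count c' : Int) ≤ (PySem.Dict.ofList hand).getD (String.singleton c') 0) := by
        intro c' hc'
        obtain ⟨v', hv', hcnd'⟩ := ha c' hc'
        refine ⟨?_, ?_⟩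
        · rw [PySem.Dict.contains_eq_isSome_get?, hv']; rfl
        · rw [PySem.Dict.getD_of_get?_eq_some _ 0 hv']; exact hcnd'
      have hpos := hnd hfirst c hc
      rw [hgd] at hpos hlt
      rcases hcnd with h1 | h1 <;> omega

set_option maxRecDepth 4096 in
theorem isValidWordComp_changed : Claim_changed_isValidWordComp := by
  unfold Claim_changed_isValidWordComp; decide

theorem isValidWordComp_tight : Claim_exact_isValidWordComp := by
  intro word hand _ hd
  rw [pvD_iff] at hd
  obtain ⟨hall, c, hc, hneg⟩ := hd
  have ha : isValidWordComp word hand = true := by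
    rw [pvA_iff]
    intro c' hc'
    obtain ⟨hcon, hcnd⟩ := hall c' hc'
    cases hget : (PySem.Dict.ofList hand).get? (String.singleton c') with
    | none =>
      rw [PySem.Dict.contains_eq_isSome_get?, hget] at hcon
      cases hcon
    | some v =>
      have hgd := PySem.Dict.getD_of_get?_eq_some _ 0 hget
      rw [hgd] at hcnd
      exact ⟨v, rfl, hcnd⟩
  have hbf : isValidWordComp_alt word hand = false := by
    rw [Bool.eq_false_iff, ne_eq, pvB_iff]
    push_neg
    refine ⟨c, hc, ?_⟩
    have := pvCount_pos hc
    omega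
  rw [ha, hbf]
  decide
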